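-- pv_equiv track=rewrite | github.com/CrazyDuck192/PythonTasks | decoder.py | prepare_code
-- ===== SOURCE A (Python) =====
-- def prepare_code(message='7 99 19 9 8 65 3 9'):
--     mes = message.split()
--     pairs = []
--     i = 0
--     j = 2
--     while i != len(mes):
--         pairs.append(mes[i:j])
--         i, j = j, j+2
--     return pairs
-- ===== SOURCE B (Python) =====
-- def prepare_code(message='7 99 19 9 8 65 3 9'):
--     pairs = []
--     for idx, tok in enumerate(message.split()):
--         if idx % 2 == 0:
--             pairs.append([tok])
--         else:
--             pairs[-1].append(tok)
--     return pairs
-- ===== Notes on version B (the rewrite author's own statement) =====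
-- stated objective: simpler
-- what changed: Replaces the two-index while loop with sliced windows by a single enumerate pass that starts a new pair on even indices and appends to the last pair on odd indices; B also terminates (with a trailing one-element pair) on odd token counts, where A loops forever (excluded by Pre_).
import Mathlib
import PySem

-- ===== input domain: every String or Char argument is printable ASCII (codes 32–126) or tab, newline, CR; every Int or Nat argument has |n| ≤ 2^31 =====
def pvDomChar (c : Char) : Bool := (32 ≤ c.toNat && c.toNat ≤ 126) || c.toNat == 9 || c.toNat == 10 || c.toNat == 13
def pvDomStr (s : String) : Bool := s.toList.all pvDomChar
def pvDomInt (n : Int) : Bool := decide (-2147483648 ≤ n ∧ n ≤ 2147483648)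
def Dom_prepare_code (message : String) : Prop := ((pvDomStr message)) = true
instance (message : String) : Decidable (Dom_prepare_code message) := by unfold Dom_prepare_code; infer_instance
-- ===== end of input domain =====

-- B replaces A's two-index while loop over slices by a single enumerate pass (new pair on even
-- index, append to last pair on odd index); same-cost, simpler decomposition.


-- ===== PORT A =====
-- A's while loop: i, j walk by two, appending mes[i:j]; loops while i ≠ len(mes).
-- fuel bounds the recursion (len/2+1 iterations suffice on even token counts, the only
-- inputs inside Pre_; on odd counts Python A diverges and the port's value is not claimed).
def prepareLoopA (mes : List String) (n : Int) : Nat → Int → Int → List (List String) → List (List String)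
  | 0, _, _, pairs => pairs
  | fuel + 1, i, j, pairs =>
      if i ≠ n then
        prepareLoopA mes n fuel j (j + 2) (pairs ++ [PySem.List.slice mes (some i) (some j)])
      else pairs

def prepare_code (message : String) : List (List String) :=
  let mes := PySem.Str.split₀ message
  prepareLoopA mes (mes.length : Int) (mes.length / 2 + 1) 0 2 []

-- ===== PORT B =====
-- pairs[-1].append(tok): append tok to the last list (Python raises on empty pairs; B's loop
-- never reaches that, the [] branch is unreachable under the loop invariant).
def pvAppendLast (pairs : List (List String)) (tok : String) : List (List String) :=
  match pairs with
  | [] => []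
  | [p] => [p ++ [tok]]
  | p :: rest => p :: pvAppendLast rest tok

def prepare_code_alt (message : String) : List (List String) :=
  (PySem.List.enumerate (PySem.Str.split₀ message) 0).foldl
    (fun pairs it =>
      if PySem.Int.mod it.1 2 = 0 then pairs ++ [[it.2]] else pvAppendLast pairs it.2) []

-- ===== PRECONDITION & SPEC =====
-- Pre_ excludes odd token counts: there A's while-loop test (inequality of i with the token
-- count) never fails, since i jumps past that count by two, and Python A loops forever.
def Pre_prepare_code (message : String) : Prop :=
  (PySem.Str.split₀ message).length % 2 = 0
instance (message : String) : Decidable (Pre_prepare_code message) := by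
  unfold Pre_prepare_code; infer_instance

def pvWitness_prepare_code : String := "7 99 19 9 8 65 3 9"

def Spec_prepare_code (message : String) (out : List (List String)) : Prop := out = prepare_code_alt message
instance (message : String) (out : List (List String)) : Decidable (Spec_prepare_code message out) := by unfold Spec_prepare_code; infer_instance

-- ===== CLAIM (what is proved, stated in full; the proofs are below) =====
def Claim_equal_prepare_code : Prop := ∀ (message : String), Dom_prepare_code message → Pre_prepare_code message → Spec_prepare_code message (prepare_code message)

-- ===== LEMMAS AND PROOFS =====

/-- Common characterisation: group a token list into consecutive pairs. -/
def pvChunk2 : List String → List (List String)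
  | [] => []
  | [a] => [[a]]
  | a :: b :: rest => [a, b] :: pvChunk2 rest

theorem pvAppendLast_snoc (acc : List (List String)) (p : List String) (t : String) :
    pvAppendLast (acc ++ [p]) t = acc ++ [p ++ [t]] := by
  induction acc with
  | nil => rfl
  | cons q acc ih =>
      cases acc with
      | nil => simp [pvAppendLast]
      | cons r acc => simpa [pvAppendLast] using ih

theorem pvFoldB_eq (xs : List String) :
    ∀ (s : Int) (acc : List (List String)), 0 ≤ s → s % 2 = 0 →
      (PySem.List.enumerate xs s).foldl
        (fun pairs it =>
          if PySem.Int.mod it.1 2 = 0 then pairs ++ [[it.2]] else pvAppendLast pairs it.2) acc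
      = acc ++ pvChunk2 xs := by
  induction xs using pvChunk2.induct with
  | case1 => intro s acc _ _; simp [PySem.List.enumerate, pvChunk2]
  | case2 a =>
      intro s acc hs he
      have hm : PySem.Int.mod s 2 = 0 := by
        simp [PySem.Int.mod, Int.fmod_eq_emod]; omega
      simp only [PySem.List.enumerate, List.foldl_cons, List.foldl_nil]
      rw [if_pos hm]; rfl
  | case3 a b rest ih =>
      intro s acc hs he
      have h1 : PySem.Int.mod s 2 = 0 := by simp [PySem.Int.mod, Int.fmod_eq_emod]; omega
      have h2 : ¬ PySem.Int.mod (s + 1) 2 = 0 := by simp [PySem.Int.mod, Int.fmod_eq_emod]; omega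
      have h3 := ih (s + 1 + 1) (acc ++ [[a, b]]) (by omega) (by omega)
      simp only [PySem.List.enumerate_cons, List.foldl_cons]
      rw [if_pos h1, if_neg h2, pvAppendLast_snoc]
      simpa [pvChunk2] using h3

theorem pvLoopA_eq (fuel : Nat) (mes : List String) :
    ∀ (i : Nat) (pairs : List (List String)), i ≤ mes.length →
      (mes.length - i) % 2 = 0 → (mes.length - i) / 2 < fuel →
      prepareLoopA mes (mes.length : Int) fuel (i : Int) ((i : Int) + 2) pairs
        = pairs ++ pvChunk2 (mes.drop i) := by
  induction fuel with
  | zero => intro i pairs _ _ h; omega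
  | succ fuel ih =>
      intro i pairs hle heven hfuel
      by_cases hi : i = mes.length
      · subst hi
        simp [prepareLoopA, pvChunk2, List.drop_length]
      · have hlt : i < mes.length := lt_of_le_of_ne hle hi
        have h2 : i + 2 ≤ mes.length := by omega
        -- the slice mes[i:i+2]
        have hslice : PySem.List.slice mes (some (i : Int)) (some ((i : Int) + 2))
            = (mes.drop i).take 2 := by
          have := PySem.List.slice_natCast_add mes i 2
          simpa using this
        have hne : (i : Int) ≠ (mes.length : Int) := by exact_mod_cast hi
        rw [prepareLoopA, if_pos hne, hslice]
        have hcast : ((i : Int) + 2) = ((i + 2 : Nat) : Int) := by push_cast; ring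
        rw [hcast, show ((i + 2 : Nat) : Int) + 2 = ((i + 2 : Nat) : Int) + 2 from rfl]
        have hrec := ih (i + 2) (pairs ++ [(mes.drop i).take 2]) h2 (by omega) (by omega)
        rw [hrec]
        -- mes.drop i = a :: b :: rest
        obtain ⟨a, b, rest, hd⟩ : ∃ a b rest, mes.drop i = a :: b :: rest := by
          have hlen : 2 ≤ (mes.drop i).length := by simp [List.length_drop]; omega
          match h : mes.drop i with
          | [] => simp [h] at hlen
          | [a] => simp [h] at hlen
          | a :: b :: rest => exact ⟨a, b, rest, rfl⟩
        have hdrop2 : mes.drop (i + 2) = rest := by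
          have : mes.drop (i + 2) = (mes.drop i).drop 2 := by
            rw [List.drop_drop]
          rw [this, hd]; rfl
        rw [hd, hdrop2]
        simp [pvChunk2]

-- ===== VERDICT (by name: the statement is the Claim_ definition above) =====
theorem prepare_code_spec : Claim_equal_prepare_code := by
  intro message _ hpre
  unfold Spec_prepare_code prepare_code prepare_code_alt
  set mes := PySem.Str.split₀ message with hmes
  have hA := pvLoopA_eq (mes.length / 2 + 1) mes 0 [] (Nat.zero_le _)
    (by simpa using hpre) (by omega)
  simp only [Nat.cast_zero, zero_add, List.drop_zero, List.nil_append] at hA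
  rw [hA, pvFoldB_eq mes 0 [] le_rfl rfl]
  exact (List.nil_append _).symm
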